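-- pv_equiv track=rewrite | github.com/sandeepny441/code_101 | Pradeep/easy_192.py | solve
-- ===== SOURCE A (Python) =====
-- def solve(s, t):
--     if s == t:
--         return True
--
--     s1 = sorted(s + t)
--
--     i = 0
--     while i < len(s1)-1:
--         if s1[i] != s1[i+1]:
--             return False
--         i = i +2
--     return True
-- ===== SOURCE B (Python) =====
-- def solve(s, t):
--     counts = {}
--     for ch in s:
--         counts[ch] = counts.get(ch, 0) + 1
--     for ch in t:
--         counts[ch] = counts.get(ch, 0) + 1
--     return all(v % 2 == 0 for v in counts.values())
-- ===== Notes on version B (the rewrite author's own statement) =====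
-- stated objective: faster
-- what changed: Instead of sorting s+t and scanning consecutive index pairs, B counts characters in one linear pass and checks that every count is even.
-- intended difference: When s+t has odd length but every character except the lexicographically largest pairs up evenly (e.g. s='a', t=''), A returns True because its pair loop never examines the last sorted element; B returns False, the intended answer since an odd-length string cannot split into equal pairs. — e.g. on solve("a", ""): A returns true, B returns false
import Mathlib
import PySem

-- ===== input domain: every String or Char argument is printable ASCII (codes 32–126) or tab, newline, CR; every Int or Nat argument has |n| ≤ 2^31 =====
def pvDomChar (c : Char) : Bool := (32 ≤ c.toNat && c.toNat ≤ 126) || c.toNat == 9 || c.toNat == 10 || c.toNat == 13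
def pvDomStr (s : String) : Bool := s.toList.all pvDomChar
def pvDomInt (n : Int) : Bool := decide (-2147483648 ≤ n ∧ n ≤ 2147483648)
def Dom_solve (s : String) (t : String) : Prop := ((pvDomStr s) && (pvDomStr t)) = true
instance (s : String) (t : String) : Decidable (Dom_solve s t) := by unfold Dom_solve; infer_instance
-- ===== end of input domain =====

-- B replaces A's sort-and-scan by a single counting pass (all character counts even);
-- on odd-length s+t whose non-maximal characters all pair up, A (accidentally ignoring
-- the last sorted element) says True while B says the intended False — stated as D_ below.

-- ===== PORT A =====
-- the while loop: i starts at 0, steps by 2 while i < len-1, comparing s1[i] with s1[i+1];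
-- transcribed as the obvious structural recursion over pairs of the same list
def pairCheck : List Char → Bool
  | a :: b :: rest => if a ≠ b then false else pairCheck rest
  | _ => true

def solve (s : String) (t : String) : Bool :=
  if s == t then true
  else pairCheck (PySem.List.sorted (s.toList ++ t.toList) (fun x => x) false)

-- ===== PORT B =====
def solve_alt (s : String) (t : String) : Bool :=
  let counts := t.toList.foldl (fun d ch => d.insert ch (d.getD ch 0 + 1))
      (s.toList.foldl (fun d ch => d.insert ch (d.getD ch 0 + 1))
        (PySem.Dict.empty : PySem.Dict Char Int))
  counts.values.all (fun v => PySem.Int.mod v 2 == 0)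

-- ===== PRECONDITION & SPEC =====
-- When s+t has odd length but every character with a larger one present occurs an even
-- number of times, A returns True (its pair loop never examines the last sorted element)
-- while B returns False, the intended answer: an odd-length string cannot split into equal pairs.
def D_solve (s : String) (t : String) : Prop :=
  ((s.toList ++ t.toList).length % 2 == 1
    && (s.toList ++ t.toList).all (fun c =>
         (s.toList ++ t.toList).all (fun d => decide (d ≤ c))
         || (s.toList ++ t.toList).count c % 2 == 0)) = true
instance (s : String) (t : String) : Decidable (D_solve s t) := by unfold D_solve; infer_instance

def Spec_solve (s : String) (t : String) (out : Bool) : Prop := ¬ D_solve s t → out = solve_alt s t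
instance (s : String) (t : String) (out : Bool) : Decidable (Spec_solve s t out) := by unfold Spec_solve; infer_instance

def pvDiffWitness_solve : String × String := ("a", "")
def pvDiffWitnessOut_solve : Bool × Bool := (true, false)

-- ===== CLAIM (what is proved, stated in full; the proofs are below) =====
def Claim_unchanged_solve : Prop := ∀ (s : String) (t : String), Dom_solve s t → Spec_solve s t (solve s t)
def Claim_changed_solve : Prop := Dom_solve (pvDiffWitness_solve.1) (pvDiffWitness_solve.2) ∧ D_solve (pvDiffWitness_solve.1) (pvDiffWitness_solve.2) ∧ solve (pvDiffWitness_solve.1) (pvDiffWitness_solve.2) = pvDiffWitnessOut_solve.1 ∧ solve_alt (pvDiffWitness_solve.1) (pvDiffWitness_solve.2) = pvDiffWitnessOut_solve.2 ∧ pvDiffWitnessOut_solve.1 ≠ pvDiffWitnessOut_solve.2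
def Claim_exact_solve : Prop := ∀ (s : String) (t : String), Dom_solve s t → D_solve s t → solve s t ≠ solve_alt s t

-- ===== LEMMAS AND PROOFS =====

-- A's characterisation: every character strictly below some element occurs an even number of times
def PairProp (u : List Char) : Prop := ∀ c : Char, (∃ d ∈ u, c < d) → 2 ∣ u.count c

lemma pairProp_perm {u v : List Char} (h : u.Perm v) : PairProp u ↔ PairProp v := by
  unfold PairProp
  constructor <;> intro hp c hex
  · rw [← h.count_eq]; exact hp c (by obtain ⟨d, hd, hlt⟩ := hex; exact ⟨d, h.mem_iff.mpr hd, hlt⟩)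
  · rw [h.count_eq]; exact hp c (by obtain ⟨d, hd, hlt⟩ := hex; exact ⟨d, h.mem_iff.mp hd, hlt⟩)

lemma pairCheck_iff : ∀ (l : List Char), l.Pairwise (· ≤ ·) → (pairCheck l = true ↔ PairProp l)
  | [], _ => by simp [pairCheck, PairProp]
  | [a], _ => by
      simp only [pairCheck, PairProp, true_iff]
      rintro c ⟨d, hd, hlt⟩
      simp only [List.mem_singleton] at hd
      subst hd
      simp [Ne.symm (ne_of_lt hlt)]
  | a :: b :: rest, h => by
      rw [List.pairwise_cons] at h
      obtain ⟨ha, h⟩ := h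
      rw [List.pairwise_cons] at h
      obtain ⟨hb, hr⟩ := h
      by_cases hab : a = b
      · subst hab
        have ih := pairCheck_iff rest hr
        unfold PairProp at ih ⊢
        have hpc : pairCheck (a :: a :: rest) = pairCheck rest := by
          simp [pairCheck]
        rw [hpc, ih]
        constructor
        · intro hp c hex
          have hcnt : 2 ∣ rest.count c := by
            obtain ⟨d, hd, hlt⟩ := hex
            simp only [List.mem_cons] at hd
            have hhead : ∀ hcd : c < a, 2 ∣ rest.count c := by
              intro hcd
              by_cases hne : rest = []
              · simp [hne]
              · obtain ⟨e, he⟩ := List.exists_mem_of_ne_nil rest hne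
                exact hp c ⟨e, he, lt_of_lt_of_le hcd (hb e he)⟩
            rcases hd with rfl | rfl | hd
            · exact hhead hlt
            · exact hhead hlt
            · exact hp c ⟨d, hd, hlt⟩
          simp only [List.count_cons]
          split_ifs <;> omega
        · intro hp c hex
          obtain ⟨d, hd, hlt⟩ := hex
          have := hp c ⟨d, by simp [hd], hlt⟩
          simp only [List.count_cons] at this
          split_ifs at this <;> omega
      · have hlt : a < b := lt_of_le_of_ne (ha b (by simp)) hab
        have hpc : pairCheck (a :: b :: rest) = false := by
          simp [pairCheck, hab]
        rw [hpc]
        simp only [Bool.false_eq_true, false_iff]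
        intro hp
        have hcount : (a :: b :: rest).count a = 1 := by
          have hnr : a ∉ rest := fun hmem =>
            absurd (hb a hmem) (not_le.mpr hlt)
          simp [List.count_eq_zero.mpr hnr, Ne.symm hab]
        have := hp a ⟨b, by simp, hlt⟩
        rw [hcount] at this
        omega

lemma mod_two_eq_zero_iff (n : Nat) : (PySem.Int.mod (n : Int) 2 == 0) = true ↔ 2 ∣ n := by
  simp [PySem.Int.mod, Int.fmod_eq_emod]
  omega

lemma D_iff (s t : String) : D_solve s t ↔
    ((s.toList ++ t.toList).length % 2 = 1 ∧
     ∀ c ∈ (s.toList ++ t.toList),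
       (∃ d ∈ (s.toList ++ t.toList), c < d) → 2 ∣ (s.toList ++ t.toList).count c) := by
  unfold D_solve
  simp only [Bool.and_eq_true, List.all_eq_true, Bool.or_eq_true, beq_iff_eq,
    decide_eq_true_eq]
  set u := s.toList ++ t.toList with hu
  constructor
  · rintro ⟨h1, h2⟩
    refine ⟨h1, fun c hc hex => ?_⟩
    rcases h2 c hc with hle | hev
    · obtain ⟨d, hd, hlt⟩ := hex
      exact absurd (hle d hd) (not_le.mpr hlt)
    · omega
  · rintro ⟨h1, h2⟩
    refine ⟨h1, fun c hc => ?_⟩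
    by_cases hex : ∃ d ∈ u, c < d
    · right
      have := h2 c hc hex
      omega
    · left
      intro d hd
      by_contra hlt
      exact hex ⟨d, hd, not_le.mp hlt⟩

lemma a_iff (s t : String) : solve s t = true ↔ PairProp (s.toList ++ t.toList) := by
  unfold solve
  by_cases hst : s = t
  · subst hst
    simp only [beq_self_eq_true, if_true, true_iff]
    intro c hex
    rw [List.count_append]
    omega
  · rw [if_neg (by simp [hst])]
    rw [pairCheck_iff _ (PySem.List.sorted_pairwise (s.toList ++ t.toList) (fun x => x))]
    exact pairProp_perm (PySem.List.sorted_perm (s.toList ++ t.toList) (fun x => x) false)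

-- B's characterisation: every character present occurs an even number of times
lemma alt_iff (s t : String) :
    solve_alt s t = true ↔ ∀ c ∈ (s.toList ++ t.toList), 2 ∣ (s.toList ++ t.toList).count c := by
  unfold solve_alt
  rw [← List.foldl_append, PySem.Dict.foldl_insert_getD_add_one_eq_counter]
  set u := s.toList ++ t.toList with hu
  show ((PySem.Dict.counter u).values.all fun v => PySem.Int.mod v 2 == 0) = true ↔ _
  rw [show (PySem.Dict.counter u).values
        = (PySem.Dict.counter u).items.map (fun p => p.2) from rfl,
      PySem.Dict.items_counter]
  simp only [List.all_eq_true, List.map_map, List.mem_map, PySem.Set.mem_ofList]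
  constructor
  · intro h c hc
    exact (mod_two_eq_zero_iff _).mp (h _ ⟨c, hc, rfl⟩)
  · rintro h v ⟨c, hc, rfl⟩
    exact (mod_two_eq_zero_iff _).mpr (h c hc)

-- if every element of v occurs an even number of times, v has even length
lemma even_length_of_even_counts :
    ∀ (n : Nat) (v : List Char), v.length ≤ n → (∀ c ∈ v, 2 ∣ v.count c) → 2 ∣ v.length
  | 0, v, hle, _ => by
      interval_cases h : v.length
      · exact ⟨0, rfl⟩
  | n + 1, v, hle, hall => by
      cases hv : v with
      | nil => exact ⟨0, by simp⟩
      | cons x xs =>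
        subst hv
        set w := (x :: xs).filter (fun y => !(y == x)) with hw
        have hsplit : ((x :: xs).filter (fun y => y == x)).length + w.length = (x :: xs).length := by
          rw [hw]; exact (List.length_eq_length_filter_add (fun y => y == x)).symm
        have hcx : (x :: xs).count x = ((x :: xs).filter (fun y => y == x)).length := by
          simp [List.count_eq_countP, List.countP_eq_length_filter]
        have hwcount : ∀ c ∈ w, w.count c = (x :: xs).count c := by
          intro c hc
          have hcx' : ¬ (c == x) = true := by
            have := List.of_mem_filter hc
            simpa using this
          rw [hw, List.count_filter]
          simp at hcx' ⊢
          intro h; exact absurd h hcx'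
        have hwlen : w.length ≤ n := by
          have hx1 : 1 ≤ (x :: xs).count x := List.one_le_count_iff.mpr (by simp)
          have : (x :: xs).length ≤ n + 1 := hle
          omega
        have hweven : 2 ∣ w.length := by
          refine even_length_of_even_counts n w hwlen ?_
          intro c hc
          rw [hwcount c hc]
          exact hall c (List.mem_of_mem_filter hc)
        have hxeven : 2 ∣ (x :: xs).count x := hall x (by simp)
        omega

-- ===== VERDICT (by name: the statements are the Claim_ definitions above) =====
theorem solve_spec : Claim_unchanged_solve := by
  intro s t _ hnd'
  rw [Bool.eq_iff_iff, a_iff, alt_iff]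
  set u := s.toList ++ t.toList with hu
  rw [D_iff, ← hu] at hnd'
  by_cases hodd : u.length % 2 = 1
  · -- odd length: both sides are false
    have hA : ¬ PairProp u := by
      intro hp
      exact hnd' ⟨hodd, fun c hc hex => hp c hex⟩
    have hB : ¬ ∀ c ∈ u, 2 ∣ u.count c := by
      intro hall
      have := even_length_of_even_counts u.length u le_rfl hall
      omega
    constructor
    · intro h; exact absurd h hA
    · intro h; exact absurd h hB
  · -- even length: the two characterisations coincide
    have heven : 2 ∣ u.length := by omega
    constructor
    · intro hp c hc
      by_cases hex : ∃ d ∈ u, c < d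
      · exact hp c hex
      · -- c is maximal in u: all other elements pair up, so does c
        push Not at hex
        set w := u.filter (fun y => !(y == c)) with hw
        have hsplit : ((u.filter (fun y => y == c))).length + w.length = u.length := by
          rw [hw]; exact (List.length_eq_length_filter_add (fun y => y == c)).symm
        have hcx : u.count c = ((u.filter (fun y => y == c))).length := by
          simp [List.count_eq_countP, List.countP_eq_length_filter]
        have hweven : 2 ∣ w.length := by
          refine even_length_of_even_counts w.length w le_rfl ?_
          intro d hd
          have hdu : d ∈ u := List.mem_of_mem_filter hd
          have hdc : ¬ (d == c) = true := by
            have := List.of_mem_filter hd; simpa using this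
          have hdlt : d < c := by
            have hle := hex d hdu
            have : d ≠ c := by simpa using hdc
            exact lt_of_le_of_ne hle this
          have hcnt : 2 ∣ u.count d := hp d ⟨c, hc, hdlt⟩
          have : w.count d = u.count d := by
            rw [hw, List.count_filter]
            simp at hdc ⊢
            intro h; exact absurd h hdc
          omega
        omega
    · intro hall c hex
      by_cases hcu : c ∈ u
      · exact hall c hcu
      · simp [List.count_eq_zero.mpr hcu]

set_option maxRecDepth 100000 in
theorem solve_changed : Claim_changed_solve := by unfold Claim_changed_solve; decide

theorem solve_tight : Claim_exact_solve := by
  intro s t _ hd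
  rw [D_iff] at hd
  obtain ⟨hodd, hall⟩ := hd
  have hA : solve s t = true := by
    rw [a_iff]
    intro c hex
    by_cases hcu : c ∈ (s.toList ++ t.toList)
    · exact hall c hcu hex
    · simp [List.count_eq_zero.mpr hcu]
  rw [hA]
  intro h
  have hb : solve_alt s t = true := h.symm
  have := even_length_of_even_counts _ _ le_rfl ((alt_iff s t).mp hb)
  omega
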